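-- pv_equiv track=rewrite | github.com/calico-team/calico-fa22 | sausages/solutions/sausages_prefix_brute.py | solve
-- ===== SOURCE A (Python) =====
-- def solve(N: int, K: int, H: list[int], L: list[int]) -> str:
--     """
--     Constructs a prefix sum for the number of sausage links with the low cut
--     fixed at 1 and high cut at different positions. Then, check every possible
--     low and high cut efficiently using differences of prefix sums.
--     """
--     max_H = max(H)
--     prefix = [0] * (max_H + 1)
--     for hi in range(1, max_H + 1):
--         for i in range(N):
--             if hi > L[i]:
--                 prefix[hi] += min(H[i], hi) - max(L[i], 1)
--
--     for lo in range(1, max_H):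
--         for hi in range(lo + 1, max_H + 1):
--             if prefix[hi] - prefix[lo] == K:
--                 return f'{lo} {hi}'
--
--     return 'IMPOSSIBLE'
-- ===== SOURCE B (Python) =====
-- def solve(N: int, K: int, H: list[int], L: list[int]) -> str:
--     """Difference-array build of the prefix table (O(N + max_H)) and a
--     value -> sorted-positions dict with binary search for the smallest hi
--     (O(max_H log max_H)), instead of A's O(max_H*N) build and O(max_H^2) scan."""
--     max_H = max(H)
--     da = [0] * (max_H + 2)  # slope deltas
--     db = [0] * (max_H + 2)  # constant deltas
--     if max_H >= 1:
--         for i in range(N):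
--             if L[i] < max_H:
--                 s = max(L[i] + 1, 1)          # first hi that counts sausage i
--                 db[s] -= max(L[i], 1)
--                 e = min(H[i], max_H)
--                 if s <= e:                    # hi-proportional part on [s, e]
--                     da[s] += 1
--                     da[e + 1] -= 1
--                 cs = max(H[i] + 1, s)
--                 if cs <= max_H:               # constant H[i] part on [cs, max_H]
--                     db[cs] += H[i]
--     prefix = [0] * (max_H + 1)
--     a = 0
--     b = 0
--     for hi in range(1, max_H + 1):
--         a += da[hi]
--         b += db[hi]
--         prefix[hi] = hi * a + b
--     positions = {}
--     for hi in range(1, max_H + 1):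
--         positions.setdefault(prefix[hi], []).append(hi)
--     for lo in range(1, max_H):
--         ps = positions.get(prefix[lo] + K)
--         if ps is not None:
--             hi = _first_greater(ps, lo)
--             if hi is not None:
--                 return f'{lo} {hi}'
--     return 'IMPOSSIBLE'
--
--
-- def _first_greater(ps: list[int], x: int) -> int | None:
--     """Smallest element of the sorted list ps strictly greater than x, or None."""
--     lo, hi = 0, len(ps)
--     while lo < hi:
--         mid = (lo + hi) // 2
--         if ps[mid] <= x:
--             lo = mid + 1
--         else:
--             hi = mid
--     return ps[lo] if lo < len(ps) else None
-- ===== Notes on version B (the rewrite author's own statement) =====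
-- stated objective: faster
-- what changed: A's O(max_H*N) nested rebuild of the prefix table is replaced by a difference-array build reconstructed in one pass (O(N + max_H)), and A's O(max_H^2) scan over all (lo, hi) pairs is replaced by a dict mapping each prefix value to its ascending position list plus a binary search for the smallest hi > lo.
import Mathlib
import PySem

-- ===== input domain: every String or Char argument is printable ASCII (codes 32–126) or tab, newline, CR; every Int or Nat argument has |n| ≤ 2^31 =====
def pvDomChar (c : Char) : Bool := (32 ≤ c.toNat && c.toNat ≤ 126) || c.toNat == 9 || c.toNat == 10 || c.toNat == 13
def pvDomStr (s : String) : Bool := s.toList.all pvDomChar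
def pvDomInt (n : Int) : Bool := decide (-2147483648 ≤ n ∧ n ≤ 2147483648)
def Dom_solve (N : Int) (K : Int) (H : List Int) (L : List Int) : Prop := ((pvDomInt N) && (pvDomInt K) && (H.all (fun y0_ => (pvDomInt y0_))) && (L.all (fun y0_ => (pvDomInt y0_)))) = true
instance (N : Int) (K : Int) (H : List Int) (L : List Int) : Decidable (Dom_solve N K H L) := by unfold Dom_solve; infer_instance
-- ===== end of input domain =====

-- B replaces A's O(max_H*N) prefix-table build by a difference-array build (O(N + max_H))
-- and A's O(max_H^2) pair scan by a value->sorted-positions dict with a binary search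
-- for the smallest hi (O(max_H log max_H)).

-- ===== PORT A =====
def solve (N : Int) (K : Int) (H : List Int) (L : List Int) : String :=
  match PySem.List.max? H (fun y => y) with
  | none => ""   -- max([]) raises ValueError; excluded by Pre_solve
  | some maxH =>
    let pre :=
      (PySem.List.pyRange 1 (maxH + 1) 1).foldl (fun pre hi =>
        (PySem.List.pyRange 0 N 1).foldl (fun pre i =>
          if PySem.List.pyGetD L i 0 < hi then
            PySem.List.pySetD pre hi
              (PySem.List.pyGetD pre hi 0 +
                (min (PySem.List.pyGetD H i 0) hi - max (PySem.List.pyGetD L i 0) 1))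
          else pre) pre)
        (List.replicate (maxH + 1).toNat 0)
    match (PySem.List.pyRange 1 maxH 1).findSome? (fun lo =>
        (PySem.List.pyRange (lo + 1) (maxH + 1) 1).findSome? (fun hi =>
          if PySem.List.pyGetD pre hi 0 - PySem.List.pyGetD pre lo 0 = K then
            some (PySem.Int.toStr lo ++ " " ++ PySem.Int.toStr hi)
          else none)) with
    | some s => s
    | none => "IMPOSSIBLE"

-- ===== PORT B =====
-- binary search: index of the first element of the sorted list ps that is > x
def firstGreaterGo (ps : List Int) (x : Int) (lo hi : Nat) : Nat :=
  if lo < hi then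
    let mid := (lo + hi) / 2
    if ps.getD mid 0 ≤ x then firstGreaterGo ps x (mid + 1) hi
    else firstGreaterGo ps x lo mid
  else lo
termination_by hi - lo
decreasing_by all_goals omega

def firstGreater (ps : List Int) (x : Int) : Option Int :=
  let l := firstGreaterGo ps x 0 ps.length
  if l < ps.length then some (ps.getD l 0) else none

def solve_alt (N : Int) (K : Int) (H : List Int) (L : List Int) : String :=
  match PySem.List.max? H (fun y => y) with
  | none => ""   -- max([]) raises ValueError; excluded by Pre_solve
  | some maxH =>
    let dadb :=
      if 1 ≤ maxH then
        (PySem.List.pyRange 0 N 1).foldl (fun (s : List Int × List Int) i =>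
          let Li := PySem.List.pyGetD L i 0
          if Li < maxH then
            let s1 := max (Li + 1) 1
            let db := PySem.List.pySetD s.2 s1 (PySem.List.pyGetD s.2 s1 0 - max Li 1)
            let Hi := PySem.List.pyGetD H i 0
            let e := min Hi maxH
            let da :=
              if s1 ≤ e then
                let da := PySem.List.pySetD s.1 s1 (PySem.List.pyGetD s.1 s1 0 + 1)
                PySem.List.pySetD da (e + 1) (PySem.List.pyGetD da (e + 1) 0 - 1)
              else s.1
            let cs := max (Hi + 1) s1
            let db := if cs ≤ maxH then PySem.List.pySetD db cs (PySem.List.pyGetD db cs 0 + Hi) else db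
            (da, db)
          else s)
          (List.replicate (maxH + 2).toNat 0, List.replicate (maxH + 2).toNat 0)
      else (List.replicate (maxH + 2).toNat 0, List.replicate (maxH + 2).toNat 0)
    let st :=
      (PySem.List.pyRange 1 (maxH + 1) 1).foldl (fun (st : Int × Int × List Int) hi =>
        let a := st.1 + PySem.List.pyGetD dadb.1 hi 0
        let b := st.2.1 + PySem.List.pyGetD dadb.2 hi 0
        (a, b, PySem.List.pySetD st.2.2 hi (hi * a + b)))
        (0, 0, List.replicate (maxH + 1).toNat 0)
    let pre := st.2.2
    let positions :=
      (PySem.List.pyRange 1 (maxH + 1) 1).foldl (fun (d : PySem.Dict Int (List Int)) hi =>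
        d.insert (PySem.List.pyGetD pre hi 0) (d.getD (PySem.List.pyGetD pre hi 0) [] ++ [hi]))
        PySem.Dict.empty
    match (PySem.List.pyRange 1 maxH 1).findSome? (fun lo =>
        match positions.get? (PySem.List.pyGetD pre lo 0 + K) with
        | some ps =>
          match firstGreater ps lo with
          | some hi => some (PySem.Int.toStr lo ++ " " ++ PySem.Int.toStr hi)
          | none => none
        | none => none) with
    | some s => s
    | none => "IMPOSSIBLE"

-- ===== PRECONDITION & SPEC =====
-- Pre_solve excludes exactly the inputs on which A raises: max([]) on empty H, and — when
-- some cut position exists (max(H) >= 1) — an IndexError on L (N > len(L)) or on H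
-- (some i < N with L[i] < max(H), i.e. L[i] below some element of H, but i >= len(H)).
def Pre_solve (N : Int) (K : Int) (H : List Int) (L : List Int) : Prop :=
  H ≠ [] ∧ ((∃ h ∈ H, 1 ≤ h) →
    N ≤ (L.length : Int) ∧
      ∀ i ∈ PySem.List.pyRange 0 N 1,
        (∃ h ∈ H, PySem.List.pyGetD L i 0 < h) → i < (H.length : Int))
instance (N : Int) (K : Int) (H : List Int) (L : List Int) : Decidable (Pre_solve N K H L) := by
  unfold Pre_solve; infer_instance

def pvWitness_solve : Int × Int × List Int × List Int := (2, 3, [3, 2], [0, 1])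

def Spec_solve (N : Int) (K : Int) (H : List Int) (L : List Int) (out : String) : Prop := out = solve_alt N K H L
instance (N : Int) (K : Int) (H : List Int) (L : List Int) (out : String) : Decidable (Spec_solve N K H L out) := by unfold Spec_solve; infer_instance

-- ===== CLAIM (what is proved, stated in full; the proofs are below) =====
def Claim_equal_solve : Prop := ∀ (N : Int) (K : Int) (H : List Int) (L : List Int), Dom_solve N K H L → Pre_solve N K H L → Spec_solve N K H L (solve N K H L)

-- ===== LEMMAS AND PROOFS =====

-- per-sausage contribution to prefix[hi] (the summand of A's inner loop)
def pvContrib (H L : List Int) (i hi : Int) : Int :=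
  if PySem.List.pyGetD L i 0 < hi then
    min (PySem.List.pyGetD H i 0) hi - max (PySem.List.pyGetD L i 0) 1
  else 0

-- the value prefix[hi] must have: sum of contributions over i in range(N)
def pvS (N : Int) (H : List Int) (L : List Int) (hi : Int) : Int :=
  ((PySem.List.pyRange 0 N 1).map (fun i => pvContrib H L i hi)).sum

-- A's inner-loop step
def pvStepA (H L : List Int) (hi : Int) (pre : List Int) (i : Int) : List Int :=
  if PySem.List.pyGetD L i 0 < hi then
    PySem.List.pySetD pre hi
      (PySem.List.pyGetD pre hi 0 +
        (min (PySem.List.pyGetD H i 0) hi - max (PySem.List.pyGetD L i 0) 1))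
  else pre

def pvBuildA (N maxH : Int) (H L : List Int) : List Int :=
  (PySem.List.pyRange 1 (maxH + 1) 1).foldl
    (fun pre hi => (PySem.List.pyRange 0 N 1).foldl (pvStepA H L hi) pre)
    (List.replicate (maxH + 1).toNat 0)

def pvStr (lo hi : Int) : String := PySem.Int.toStr lo ++ " " ++ PySem.Int.toStr hi

def pvFinishA (pre : List Int) (maxH K : Int) : Option String :=
  (PySem.List.pyRange 1 maxH 1).findSome? (fun lo =>
    (PySem.List.pyRange (lo + 1) (maxH + 1) 1).findSome? (fun hi =>
      if PySem.List.pyGetD pre hi 0 - PySem.List.pyGetD pre lo 0 = K then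
        some (pvStr lo hi)
      else none))

lemma solveA_eq (N K : Int) (H L : List Int) :
    solve N K H L =
      match PySem.List.max? H (fun y => y) with
      | none => ""
      | some maxH =>
        match pvFinishA (pvBuildA N maxH H L) maxH K with
        | some s => s
        | none => "IMPOSSIBLE" := rfl

-- B's difference-array step
def pvStepB (maxH : Int) (H L : List Int) (s : List Int × List Int) (i : Int) :
    List Int × List Int :=
  let Li := PySem.List.pyGetD L i 0
  if Li < maxH then
    let s1 := max (Li + 1) 1
    let db := PySem.List.pySetD s.2 s1 (PySem.List.pyGetD s.2 s1 0 - max Li 1)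
    let Hi := PySem.List.pyGetD H i 0
    let e := min Hi maxH
    let da :=
      if s1 ≤ e then
        let da := PySem.List.pySetD s.1 s1 (PySem.List.pyGetD s.1 s1 0 + 1)
        PySem.List.pySetD da (e + 1) (PySem.List.pyGetD da (e + 1) 0 - 1)
      else s.1
    let cs := max (Hi + 1) s1
    let db := if cs ≤ maxH then PySem.List.pySetD db cs (PySem.List.pyGetD db cs 0 + Hi) else db
    (da, db)
  else s

def pvDiffArr (N maxH : Int) (H L : List Int) : List Int × List Int :=
  if 1 ≤ maxH then
    (PySem.List.pyRange 0 N 1).foldl (pvStepB maxH H L)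
      (List.replicate (maxH + 2).toNat 0, List.replicate (maxH + 2).toNat 0)
  else (List.replicate (maxH + 2).toNat 0, List.replicate (maxH + 2).toNat 0)

def pvBuildB (dadb : List Int × List Int) (maxH : Int) : Int × Int × List Int :=
  (PySem.List.pyRange 1 (maxH + 1) 1).foldl (fun (st : Int × Int × List Int) hi =>
    let a := st.1 + PySem.List.pyGetD dadb.1 hi 0
    let b := st.2.1 + PySem.List.pyGetD dadb.2 hi 0
    (a, b, PySem.List.pySetD st.2.2 hi (hi * a + b)))
    (0, 0, List.replicate (maxH + 1).toNat 0)

def pvDict (pre : List Int) (maxH : Int) : PySem.Dict Int (List Int) :=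
  (PySem.List.pyRange 1 (maxH + 1) 1).foldl (fun (d : PySem.Dict Int (List Int)) hi =>
    d.insert (PySem.List.pyGetD pre hi 0) (d.getD (PySem.List.pyGetD pre hi 0) [] ++ [hi]))
    PySem.Dict.empty

def pvFinishB (pre : List Int) (d : PySem.Dict Int (List Int)) (maxH K : Int) : Option String :=
  (PySem.List.pyRange 1 maxH 1).findSome? (fun lo =>
    match d.get? (PySem.List.pyGetD pre lo 0 + K) with
    | some ps =>
      match firstGreater ps lo with
      | some hi => some (pvStr lo hi)
      | none => none
    | none => none)

lemma solveB_eq (N K : Int) (H L : List Int) :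
    solve_alt N K H L =
      match PySem.List.max? H (fun y => y) with
      | none => ""
      | some maxH =>
        match pvFinishB (pvBuildB (pvDiffArr N maxH H L) maxH).2.2
                (pvDict (pvBuildB (pvDiffArr N maxH H L) maxH).2.2 maxH) maxH K with
        | some s => s
        | none => "IMPOSSIBLE" := rfl

-- ---- generic list helpers ----

lemma pv_pyGetD_nonneg (l : List Int) (j : Int) (hj : 0 ≤ j) (d : Int) :
    PySem.List.pyGetD l j d = l.getD j.toNat d := by
  have h : j = ((j.toNat : Nat) : Int) := by omega
  conv_lhs => rw [h]
  rw [PySem.List.pyGetD_natCast]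

lemma pv_getD_set (l : List Int) (k j : Nat) (v d : Int) :
    (l.set k v).getD j d = if j = k ∧ k < l.length then v else l.getD j d := by
  simp only [List.getD_eq_getElem?_getD, List.getElem?_set]
  by_cases h1 : k = j
  · subst h1
    by_cases h2 : k < l.length
    · simp [h2]
    · have hn : l[k]? = none := by
        rw [List.getElem?_eq_none_iff]; omega
      simp [h2]
  · simp only [if_neg h1]
    rw [if_neg (by exact fun hh => h1 hh.1.symm)]

lemma pvFindSome?_congr {α β : Type} (l : List α) (f g : α → Option β)
    (h : ∀ x ∈ l, f x = g x) : l.findSome? f = l.findSome? g := by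
  induction l with
  | nil => rfl
  | cons a t ih =>
    simp only [List.findSome?_cons, h a (by simp)]
    cases g a with
    | none => exact ih (fun x hx => h x (by simp [hx]))
    | some b => rfl

lemma pvFindSome?_ite {α β : Type} (l : List α) (p : α → Prop) [DecidablePred p] (f : α → β) :
    l.findSome? (fun x => if p x then some (f x) else none) =
      (l.find? (fun x => decide (p x))).map f := by
  induction l with
  | nil => rfl
  | cons a t ih =>
    by_cases hp : p a <;> simp [hp, ih]

lemma pvFind?_congr {α : Type} (l : List α) (p q : α → Bool)
    (h : ∀ x ∈ l, p x = q x) : l.find? p = l.find? q := by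
  induction l with
  | nil => rfl
  | cons a t ih =>
    simp only [List.find?_cons, h a (by simp)]
    cases hq : q a
    · exact ih (fun x hx => h x (by simp [hx]))
    · rfl

lemma pvFind?_first (ps : List Int) (p : Int → Bool) (r : Nat) (hr : r ≤ ps.length)
    (h1 : ∀ (j : Nat) (hj : j < ps.length), j < r → p ps[j] = false)
    (h2 : ∀ (hj : r < ps.length), p ps[r] = true) :
    ps.find? p = ps[r]? := by
  induction ps generalizing r with
  | nil => simp
  | cons a t ih =>
    cases r with
    | zero =>
      have := h2 (by simp)
      simp only [List.getElem_cons_zero] at this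
      simp [this]
    | succ r' =>
      have ha : p a = false := by
        have := h1 0 (by simp) (by omega)
        simpa using this
      simp only [List.find?_cons, ha, List.getElem?_cons_succ]
      exact ih r' (by simpa using hr)
        (fun j hj hlt => by simpa using h1 (j + 1) (by simpa using hj) (by omega))
        (fun hj => by simpa using h2 (by simpa using hj))

-- ---- A-side build characterization ----

lemma pvInnerA (H L : List Int) (hi : Int) (I : List Int) (pre : List Int)
    (h0 : 0 ≤ hi) (hlen : hi < (pre.length : Int)) :
    (I.foldl (pvStepA H L hi) pre).length = pre.length ∧
    ∀ j : Int, 0 ≤ j →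
      PySem.List.pyGetD (I.foldl (pvStepA H L hi) pre) j 0 =
        if j = hi then
          PySem.List.pyGetD pre hi 0 + (I.map (fun i => pvContrib H L i hi)).sum
        else PySem.List.pyGetD pre j 0 := by
  induction I generalizing pre with
  | nil =>
    refine ⟨rfl, fun j hj => ?_⟩
    simp only [List.foldl_nil, List.map_nil, List.sum_nil, add_zero]
    split
    · next h => rw [h]
    · rfl
  | cons i I ih =>
    simp only [List.foldl_cons, List.map_cons, List.sum_cons]
    have hstep_len : (pvStepA H L hi pre i).length = pre.length := by
      unfold pvStepA; split
      · simp [PySem.List.pySetD_of_nonneg _ _ h0]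
      · rfl
    have hstep_get : ∀ j : Int, 0 ≤ j →
        PySem.List.pyGetD (pvStepA H L hi pre i) j 0 =
          if j = hi then PySem.List.pyGetD pre hi 0 + pvContrib H L i hi
          else PySem.List.pyGetD pre j 0 := by
      intro j hj
      unfold pvStepA pvContrib
      split
      · rw [PySem.List.pySetD_of_nonneg _ _ h0, pv_pyGetD_nonneg _ j hj,
          pv_getD_set, pv_pyGetD_nonneg _ hi h0]
        by_cases hjh : j = hi
        · subst hjh
          rw [if_pos ⟨rfl, by omega⟩, if_pos rfl]
        · rw [if_neg (by intro hh; exact hjh (by omega)), if_neg hjh,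
            pv_pyGetD_nonneg _ j hj]
      · split
        · next hjh => subst hjh; omega
        · rfl
    obtain ⟨len', get'⟩ := ih (pvStepA H L hi pre i) (by rw [hstep_len]; omega)
    refine ⟨by rw [len', hstep_len], ?_⟩
    intro j hj
    rw [get' j hj, hstep_get hi h0, hstep_get j hj]
    by_cases hjh : j = hi
    · subst hjh
      rw [if_pos rfl, if_pos rfl, if_pos rfl]
      ring
    · rw [if_neg hjh, if_neg hjh, if_neg hjh]

lemma pvOuterA (N : Int) (H L : List Int) (maxH : Int) (a : Int) (ha : 1 ≤ a) (pre : List Int)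
    (hlen : pre.length = (maxH + 1).toNat)
    (hzero : ∀ j : Int, a ≤ j → j ≤ maxH → PySem.List.pyGetD pre j 0 = 0) :
    ((PySem.List.pyRange a (maxH + 1) 1).foldl
        (fun pre hi => (PySem.List.pyRange 0 N 1).foldl (pvStepA H L hi) pre) pre).length
      = pre.length ∧
    ∀ j : Int, 0 ≤ j →
      PySem.List.pyGetD
        ((PySem.List.pyRange a (maxH + 1) 1).foldl
          (fun pre hi => (PySem.List.pyRange 0 N 1).foldl (pvStepA H L hi) pre) pre) j 0 =
        if a ≤ j ∧ j ≤ maxH then pvS N H L j else PySem.List.pyGetD pre j 0 := by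
  by_cases hstop : maxH + 1 ≤ a
  · rw [PySem.List.pyRange_one_eq_nil hstop]
    exact ⟨rfl, fun j hj => by rw [List.foldl_nil, if_neg (by omega)]⟩
  · have hax : a ≤ maxH := by omega
    have hcons := PySem.List.pyRange_one_cons (a := a) (b := maxH + 1) (by omega)
    rw [hcons, List.foldl_cons]
    have hpre1 := pvInnerA H L a (PySem.List.pyRange 0 N 1) pre (by omega)
      (by rw [hlen]; omega)
    obtain ⟨hlen1, hget1⟩ := hpre1
    have ih := pvOuterA N H L maxH (a + 1) (by omega)
      ((PySem.List.pyRange 0 N 1).foldl (pvStepA H L a) pre)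
      (by rw [hlen1, hlen])
      (by
        intro j hj1 hj2
        rw [hget1 j (by omega), if_neg (by omega)]
        exact hzero j (by omega) hj2)
    obtain ⟨ihlen, ihget⟩ := ih
    refine ⟨by rw [ihlen, hlen1], ?_⟩
    intro j hj
    rw [ihget j hj]
    by_cases hcase : a + 1 ≤ j ∧ j ≤ maxH
    · rw [if_pos hcase, if_pos (by omega)]
    · rw [if_neg hcase, hget1 j hj]
      by_cases hja : j = a
      · subst hja
        rw [if_pos rfl, if_pos (by omega), hzero j (by omega) hax]
        unfold pvS
        ring
      · rw [if_neg hja, if_neg (by omega)]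
termination_by (maxH + 1 - a).toNat
decreasing_by omega

lemma pvBuildA_getD (N : Int) (H L : List Int) (maxH : Int) (hmax : 1 ≤ maxH) :
    ∀ j : Int, 1 ≤ j → j ≤ maxH →
      PySem.List.pyGetD (pvBuildA N maxH H L) j 0 = pvS N H L j := by
  intro j hj1 hj2
  have hrep : ∀ k : Int, 0 ≤ k →
      PySem.List.pyGetD (List.replicate (maxH + 1).toNat (0 : Int)) k 0 = 0 := by
    intro k hk
    rw [pv_pyGetD_nonneg _ k hk]
    simp [List.getD_eq_getElem?_getD, List.getElem?_replicate]
    split <;> rfl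
  obtain ⟨_, hget⟩ := pvOuterA N H L maxH 1 le_rfl
    (List.replicate (maxH + 1).toNat 0) (by simp)
    (fun k hk1 hk2 => hrep k (by omega))
  unfold pvBuildA
  rw [hget j (by omega), if_pos ⟨hj1, hj2⟩]

-- ---- B-side build characterization ----

def pvPart (l : List Int) (b : Int) : Int :=
  ((PySem.List.pyRange 1 (b + 1) 1).map (fun j => PySem.List.pyGetD l j 0)).sum

def pvRecon (da db : List Int) (hi : Int) : Int := hi * pvPart da hi + pvPart db hi

lemma pvSum_set (l : List Int) (k v : Int) (a b : Int) (h0 : 0 ≤ k) (ha : 0 ≤ a)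
    (hk : k < (l.length : Int)) :
    ((PySem.List.pyRange a b 1).map (fun j => PySem.List.pyGetD (PySem.List.pySetD l k v) j 0)).sum
      = ((PySem.List.pyRange a b 1).map (fun j => PySem.List.pyGetD l j 0)).sum
        + (if a ≤ k ∧ k < b then v - PySem.List.pyGetD l k 0 else 0) := by
  by_cases hab : b ≤ a
  · rw [PySem.List.pyRange_one_eq_nil hab]
    rw [if_neg (by omega)]
    simp
  · rw [PySem.List.pyRange_one_cons (by omega : a < b), List.map_cons, List.map_cons,
      List.sum_cons, List.sum_cons,
      pvSum_set l k v (a + 1) b h0 (by omega) hk]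
    have hhead : PySem.List.pyGetD (PySem.List.pySetD l k v) a 0 =
        if a = k then v else PySem.List.pyGetD l a 0 := by
      rw [PySem.List.pySetD_of_nonneg _ _ h0, pv_pyGetD_nonneg _ a ha, pv_getD_set]
      by_cases hak : a = k
      · subst hak
        rw [if_pos ⟨rfl, by omega⟩, if_pos rfl]
      · rw [if_neg (by intro hh; exact hak (by omega)), if_neg hak,
          pv_pyGetD_nonneg _ a ha]
    rw [hhead]
    by_cases hak : a = k
    · subst hak
      rw [if_pos rfl, if_neg (by omega), if_pos ⟨by omega, by omega⟩]
      ring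
    · rw [if_neg hak]
      by_cases hin : a + 1 ≤ k ∧ k < b
      · rw [if_pos hin, if_pos (by omega)]
        ring
      · rw [if_neg hin, if_neg (by omega)]
        ring
termination_by (b - a).toNat
decreasing_by omega

lemma pvPart_set (l : List Int) (k v : Int) (hi : Int) (h0 : 1 ≤ k) (hk : k < (l.length : Int)) :
    pvPart (PySem.List.pySetD l k v) hi
      = pvPart l hi + (if k ≤ hi then v - PySem.List.pyGetD l k 0 else 0) := by
  unfold pvPart
  rw [pvSum_set l k v 1 (hi + 1) (by omega) (by omega) hk]
  congr 1
  split_ifs <;> first | rfl | omega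

lemma pvPart_replicate (n : Nat) (b : Int) : pvPart (List.replicate n (0 : Int)) b = 0 := by
  unfold pvPart
  apply List.sum_eq_zero
  intro x hx
  rw [List.mem_map] at hx
  obtain ⟨j, hj, rfl⟩ := hx
  rw [PySem.List.mem_pyRange_one] at hj
  rw [pv_pyGetD_nonneg _ j (by omega)]
  simp [List.getD_eq_getElem?_getD, List.getElem?_replicate]
  split <;> rfl

lemma pvPart_succ (l : List Int) (c : Int) (hc : 1 ≤ c) :
    pvPart l c = pvPart l (c - 1) + PySem.List.pyGetD l c 0 := by
  unfold pvPart
  have h1 : c - 1 + 1 = c := by omega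
  rw [h1, PySem.List.pyRange_one_succ_right (by omega : (1:Int) ≤ c)]
  simp

lemma pvDelta (Li Hi maxH hi : Int) (hLi : Li < maxH) (hmax : 1 ≤ maxH)
    (h1 : 1 ≤ hi) (h2 : hi ≤ maxH) :
    hi * (if max (Li + 1) 1 ≤ min Hi maxH then
            (if max (Li + 1) 1 ≤ hi then (1 : Int) else 0)
              + (if min Hi maxH + 1 ≤ hi then (-1 : Int) else 0)
          else 0)
      + ((if max (Li + 1) 1 ≤ hi then -(max Li 1) else 0)
          + (if max (Hi + 1) (max (Li + 1) 1) ≤ maxH then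
              (if max (Hi + 1) (max (Li + 1) 1) ≤ hi then Hi else 0)
            else 0))
      = (if Li < hi then min Hi hi - max Li 1 else 0) := by
  split_ifs <;> omega

lemma pvStepB_recon (maxH : Int) (H L : List Int) (i : Int) (s : List Int × List Int)
    (hla : s.1.length = (maxH + 2).toNat) (hlb : s.2.length = (maxH + 2).toNat)
    (hmax : 1 ≤ maxH) :
    (pvStepB maxH H L s i).1.length = s.1.length ∧
    (pvStepB maxH H L s i).2.length = s.2.length ∧
    ∀ hi : Int, 1 ≤ hi → hi ≤ maxH →
      pvRecon (pvStepB maxH H L s i).1 (pvStepB maxH H L s i).2 hi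
        = pvRecon s.1 s.2 hi + pvContrib H L i hi := by
  have hla2 : (s.1.length : Int) = maxH + 2 := by rw [hla]; omega
  have hlb2 : (s.2.length : Int) = maxH + 2 := by rw [hlb]; omega
  simp only [pvStepB]
  by_cases hLi : PySem.List.pyGetD L i 0 < maxH
  · rw [if_pos hLi]
    set Li := PySem.List.pyGetD L i 0 with hLidef
    set Hi := PySem.List.pyGetD H i 0 with hHidef
    set s1 := max (Li + 1) 1 with hs1
    set e := min Hi maxH with he
    set cs := max (Hi + 1) s1 with hcs
    have hs1a : 1 ≤ s1 := le_max_right _ _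
    have hs1b : s1 ≤ maxH := by omega
    by_cases hse : s1 ≤ e <;> by_cases hcsb : cs ≤ maxH <;>
        [rw [if_pos hse, if_pos hcsb]; rw [if_pos hse, if_neg hcsb];
         rw [if_neg hse, if_pos hcsb]; rw [if_neg hse, if_neg hcsb]] <;>
      dsimp only <;>
      refine ⟨by simp [PySem.List.length_pySetD], by simp [PySem.List.length_pySetD], ?_⟩ <;>
      intro hi h1 h2 <;>
      have hd := pvDelta Li Hi maxH hi hLi hmax h1 h2 <;>
      rw [← hs1, ← he, ← hcs] at hd <;>
      unfold pvRecon pvContrib <;>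
      rw [← hLidef, ← hHidef]
    · rw [pvPart_set _ _ _ _ (by omega) (by simp [PySem.List.length_pySetD]; omega),
        pvPart_set _ _ _ _ hs1a (by omega),
        pvPart_set _ _ _ _ (by omega : 1 ≤ cs) (by simp [PySem.List.length_pySetD]; omega),
        pvPart_set _ _ _ _ hs1a (by omega)]
      rw [if_pos hse, if_pos hcsb] at hd
      ring_nf at hd ⊢
      linarith [hd]
    · rw [pvPart_set _ _ _ _ (by omega) (by simp [PySem.List.length_pySetD]; omega),
        pvPart_set _ _ _ _ hs1a (by omega),
        pvPart_set _ _ _ _ hs1a (by omega)]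
      rw [if_pos hse, if_neg hcsb] at hd
      ring_nf at hd ⊢
      linarith [hd]
    · rw [pvPart_set _ _ _ _ (by omega : 1 ≤ cs) (by simp [PySem.List.length_pySetD]; omega),
        pvPart_set _ _ _ _ hs1a (by omega)]
      rw [if_neg hse, if_pos hcsb] at hd
      ring_nf at hd ⊢
      linarith [hd]
    · rw [pvPart_set _ _ _ _ hs1a (by omega)]
      rw [if_neg hse, if_neg hcsb] at hd
      ring_nf at hd ⊢
      linarith [hd]
  · rw [if_neg hLi]
    refine ⟨rfl, rfl, ?_⟩
    intro hi h1 h2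
    unfold pvContrib
    rw [if_neg (by omega), add_zero]

lemma pvFoldB (maxH : Int) (H L : List Int) (hmax : 1 ≤ maxH) (I : List Int)
    (s : List Int × List Int)
    (hla : s.1.length = (maxH + 2).toNat) (hlb : s.2.length = (maxH + 2).toNat) :
    (I.foldl (pvStepB maxH H L) s).1.length = (maxH + 2).toNat ∧
    (I.foldl (pvStepB maxH H L) s).2.length = (maxH + 2).toNat ∧
    ∀ hi : Int, 1 ≤ hi → hi ≤ maxH →
      pvRecon (I.foldl (pvStepB maxH H L) s).1 (I.foldl (pvStepB maxH H L) s).2 hi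
        = pvRecon s.1 s.2 hi + (I.map (fun i => pvContrib H L i hi)).sum := by
  induction I generalizing s with
  | nil => exact ⟨hla, hlb, fun hi _ _ => by simp⟩
  | cons i I ih =>
    obtain ⟨h1, h2, h3⟩ := pvStepB_recon maxH H L i s hla hlb hmax
    obtain ⟨ih1, ih2, ih3⟩ := ih (pvStepB maxH H L s i) (by rw [h1, hla]) (by rw [h2, hlb])
    refine ⟨ih1, ih2, ?_⟩
    intro hi hh1 hh2
    simp only [List.foldl_cons, List.map_cons, List.sum_cons]
    rw [ih3 hi hh1 hh2, h3 hi hh1 hh2]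
    ring

lemma pvBuildPre (dadb : List Int × List Int) (maxH : Int) (c : Int) (hc : 1 ≤ c)
    (st : Int × Int × List Int)
    (ha : st.1 = pvPart dadb.1 (c - 1)) (hb : st.2.1 = pvPart dadb.2 (c - 1))
    (hlen : st.2.2.length = (maxH + 1).toNat) :
    ((PySem.List.pyRange c (maxH + 1) 1).foldl (fun (st : Int × Int × List Int) hi =>
        let a := st.1 + PySem.List.pyGetD dadb.1 hi 0
        let b := st.2.1 + PySem.List.pyGetD dadb.2 hi 0
        (a, b, PySem.List.pySetD st.2.2 hi (hi * a + b))) st).2.2.length = (maxH + 1).toNat ∧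
    ∀ j : Int, 0 ≤ j →
      PySem.List.pyGetD ((PySem.List.pyRange c (maxH + 1) 1).foldl
          (fun (st : Int × Int × List Int) hi =>
            let a := st.1 + PySem.List.pyGetD dadb.1 hi 0
            let b := st.2.1 + PySem.List.pyGetD dadb.2 hi 0
            (a, b, PySem.List.pySetD st.2.2 hi (hi * a + b))) st).2.2 j 0
        = if c ≤ j ∧ j ≤ maxH then pvRecon dadb.1 dadb.2 j else PySem.List.pyGetD st.2.2 j 0 := by
  by_cases hstop : maxH + 1 ≤ c
  · rw [PySem.List.pyRange_one_eq_nil hstop]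
    exact ⟨hlen, fun j hj => by rw [List.foldl_nil, if_neg (by omega)]⟩
  · rw [PySem.List.pyRange_one_cons (by omega : c < maxH + 1), List.foldl_cons]
    have hget_set : ∀ j : Int, 0 ≤ j →
        PySem.List.pyGetD
          (PySem.List.pySetD st.2.2 c (c * (st.1 + PySem.List.pyGetD dadb.1 c 0)
            + (st.2.1 + PySem.List.pyGetD dadb.2 c 0))) j 0 =
          if j = c then pvRecon dadb.1 dadb.2 c else PySem.List.pyGetD st.2.2 j 0 := by
      intro j hj
      rw [PySem.List.pySetD_of_nonneg _ _ (by omega : (0:Int) ≤ c),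
        pv_pyGetD_nonneg _ j hj, pv_getD_set]
      by_cases hjc : j = c
      · rw [if_pos ⟨by omega, by rw [hlen]; omega⟩, if_pos hjc]
        unfold pvRecon
        rw [ha, hb, pvPart_succ dadb.1 c hc, pvPart_succ dadb.2 c hc]
      · rw [if_neg (by intro hh; exact hjc (by omega)), if_neg hjc,
          pv_pyGetD_nonneg _ j hj]
    obtain ⟨ih1, ih2⟩ := pvBuildPre dadb maxH (c + 1) (by omega)
      (st.1 + PySem.List.pyGetD dadb.1 c 0, st.2.1 + PySem.List.pyGetD dadb.2 c 0,
        PySem.List.pySetD st.2.2 c (c * (st.1 + PySem.List.pyGetD dadb.1 c 0)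
          + (st.2.1 + PySem.List.pyGetD dadb.2 c 0)))
      (by simp only; rw [ha, ← pvPart_succ dadb.1 c hc]; congr 1; omega)
      (by simp only; rw [hb, ← pvPart_succ dadb.2 c hc]; congr 1; omega)
      (by simp only [PySem.List.length_pySetD]; exact hlen)
    refine ⟨ih1, ?_⟩
    intro j hj
    rw [ih2 j hj]
    simp only at ih2 ⊢
    by_cases hcase : c + 1 ≤ j ∧ j ≤ maxH
    · rw [if_pos hcase, if_pos (by omega)]
    · rw [if_neg hcase, hget_set j hj]
      by_cases hjc : j = c
      · subst hjc
        rw [if_pos rfl, if_pos (by omega)]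
      · rw [if_neg hjc, if_neg (by omega)]
termination_by (maxH + 1 - c).toNat
decreasing_by omega

lemma pvPreEq (N : Int) (H L : List Int) (maxH : Int) (hmax : 1 ≤ maxH) :
    ∀ j : Int, 1 ≤ j → j ≤ maxH →
      PySem.List.pyGetD (pvBuildA N maxH H L) j 0
        = PySem.List.pyGetD (pvBuildB (pvDiffArr N maxH H L) maxH).2.2 j 0 := by
  intro j hj1 hj2
  rw [pvBuildA_getD N H L maxH hmax j hj1 hj2]
  have hrep : (List.replicate (maxH + 2).toNat (0 : Int)).length = (maxH + 2).toNat := by simp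
  have hdiff : pvDiffArr N maxH H L = (PySem.List.pyRange 0 N 1).foldl (pvStepB maxH H L)
      (List.replicate (maxH + 2).toNat 0, List.replicate (maxH + 2).toNat 0) := by
    unfold pvDiffArr
    rw [if_pos hmax]
  obtain ⟨hfa, hfb, hfr⟩ := pvFoldB maxH H L hmax (PySem.List.pyRange 0 N 1)
    (List.replicate (maxH + 2).toNat 0, List.replicate (maxH + 2).toNat 0) hrep hrep
  obtain ⟨hb1, hb2⟩ := pvBuildPre (pvDiffArr N maxH H L) maxH 1 le_rfl
    (0, 0, List.replicate (maxH + 1).toNat 0)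
    (by simp only; unfold pvPart; norm_num [PySem.List.pyRange_one_eq_nil])
    (by simp only; unfold pvPart; norm_num [PySem.List.pyRange_one_eq_nil])
    (by simp)
  unfold pvBuildB
  rw [hb2 j (by omega), if_pos ⟨hj1, hj2⟩, hdiff]
  rw [hfr j hj1 hj2]
  unfold pvRecon
  rw [pvPart_replicate]
  unfold pvS
  ring


-- ---- search-side characterization ----

lemma pvDictInv (pre : List Int) (R P : List Int) (d : PySem.Dict Int (List Int))
    (hinv : ∀ v : Int, d.get? v =
      (if P.filter (fun h => PySem.List.pyGetD pre h 0 == v) = [] then none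
       else some (P.filter (fun h => PySem.List.pyGetD pre h 0 == v)))) :
    ∀ v : Int,
      ((R.foldl (fun (d : PySem.Dict Int (List Int)) hi =>
          d.insert (PySem.List.pyGetD pre hi 0)
            (d.getD (PySem.List.pyGetD pre hi 0) [] ++ [hi])) d).get? v =
        (if (P ++ R).filter (fun h => PySem.List.pyGetD pre h 0 == v) = [] then none
         else some ((P ++ R).filter (fun h => PySem.List.pyGetD pre h 0 == v)))) := by
  induction R generalizing P d with
  | nil => simpa using hinv
  | cons hi R ih =>
    intro v
    rw [List.foldl_cons]
    have hinv' : ∀ v : Int,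
        (d.insert (PySem.List.pyGetD pre hi 0)
          (d.getD (PySem.List.pyGetD pre hi 0) [] ++ [hi])).get? v =
        (if (P ++ [hi]).filter (fun h => PySem.List.pyGetD pre h 0 == v) = [] then none
         else some ((P ++ [hi]).filter (fun h => PySem.List.pyGetD pre h 0 == v))) := by
      intro w
      rw [PySem.Dict.get?_insert]
      have hgetD : d.getD (PySem.List.pyGetD pre hi 0) [] =
          P.filter (fun h => PySem.List.pyGetD pre h 0 == PySem.List.pyGetD pre hi 0) := by
        rw [PySem.Dict.getD_eq_get?_getD, hinv]
        split
        · next hnil => rw [hnil]; rfl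
        · rfl
      by_cases hw : w = PySem.List.pyGetD pre hi 0
      · rw [if_pos hw, hgetD, ← hw, List.filter_append]
        have h1 : [hi].filter (fun h => PySem.List.pyGetD pre h 0 == w) = [hi] := by
          simp [hw]
        rw [h1, if_neg (by simp)]
      · have hpred : (PySem.List.pyGetD pre hi 0 == w) = false := by
          rw [beq_eq_false_iff_ne]
          exact fun hc => hw hc.symm
        have h0 : [hi].filter (fun h => PySem.List.pyGetD pre h 0 == w) = [] := by
          simp [List.filter, hpred]
        rw [if_neg hw, hinv w, List.filter_append, h0, List.append_nil]
    have := ih (P ++ [hi])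
      (d.insert (PySem.List.pyGetD pre hi 0) (d.getD (PySem.List.pyGetD pre hi 0) [] ++ [hi]))
      hinv' v
    simpa [List.append_assoc] using this

lemma pvDict_get? (pre : List Int) (maxH : Int) (v : Int) :
    (pvDict pre maxH).get? v =
      (if (PySem.List.pyRange 1 (maxH + 1) 1).filter
            (fun h => PySem.List.pyGetD pre h 0 == v) = [] then none
       else some ((PySem.List.pyRange 1 (maxH + 1) 1).filter
            (fun h => PySem.List.pyGetD pre h 0 == v))) := by
  have := pvDictInv pre (PySem.List.pyRange 1 (maxH + 1) 1) [] PySem.Dict.empty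
    (by intro v; simp [PySem.Dict.get?_empty])
  simpa using this v

lemma pvFgGo (ps : List Int) (x : Int) (hs : ps.Pairwise (· < ·)) :
    ∀ (n lo hi : Nat), hi - lo ≤ n → lo ≤ hi → hi ≤ ps.length →
      (∀ (j : Nat) (hj : j < ps.length), j < lo → ps[j] ≤ x) →
      (∀ (j : Nat) (hj : j < ps.length), hi ≤ j → x < ps[j]) →
      firstGreaterGo ps x lo hi ≤ ps.length ∧
      (∀ (j : Nat) (hj : j < ps.length), j < firstGreaterGo ps x lo hi → ps[j] ≤ x) ∧
      (∀ (j : Nat) (hj : j < ps.length), firstGreaterGo ps x lo hi ≤ j → x < ps[j]) := by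
  intro n
  induction n with
  | zero =>
    intro lo hi hn hlh hhi hL hR
    have hlo : lo = hi := by omega
    rw [firstGreaterGo, if_neg (by omega)]
    exact ⟨by omega, fun j hj hjlo => hL j hj (by omega), fun j hj hjlo => hR j hj (by omega)⟩
  | succ n ih =>
    intro lo hi hn hlh hhi hL hR
    rw [firstGreaterGo]
    by_cases hlt : lo < hi
    · rw [if_pos hlt]
      have hmid : (lo + hi) / 2 < hi := by omega
      have hmidlo : lo ≤ (lo + hi) / 2 := by omega
      have hmidlen : (lo + hi) / 2 < ps.length := by omega
      have hmono : ∀ (a b : Nat) (ha : a < ps.length) (hb : b < ps.length), a ≤ b →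
          ps[a] ≤ ps[b] := by
        intro a b ha hb hab
        rcases Nat.lt_or_ge a b with h | h
        · exact le_of_lt ((List.pairwise_iff_getElem.mp hs) a b ha hb h)
        · have : a = b := by omega
          subst this; exact le_refl _
      by_cases hcmp : ps.getD ((lo + hi) / 2) 0 ≤ x
      · rw [if_pos hcmp]
        rw [List.getD_eq_getElem _ _ hmidlen] at hcmp
        exact ih ((lo + hi) / 2 + 1) hi (by omega) (by omega) hhi
          (fun j hj hjlo => le_trans (hmono j ((lo + hi) / 2) hj hmidlen (by omega)) hcmp)
          hR
      · rw [if_neg hcmp]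
        rw [List.getD_eq_getElem _ _ hmidlen] at hcmp
        rw [not_le] at hcmp
        exact ih lo ((lo + hi) / 2) (by omega) (by omega) (by omega) hL
          (fun j hj hjlo => lt_of_lt_of_le hcmp (hmono ((lo + hi) / 2) j hmidlen hj hjlo))
    · rw [if_neg hlt]
      exact ⟨by omega, fun j hj hjlo => hL j hj (by omega),
        fun j hj hjlo => hR j hj (by omega)⟩

lemma pvFirstGreater_eq (ps : List Int) (x : Int) (hs : ps.Pairwise (· < ·)) :
    firstGreater ps x = ps.find? (fun p => decide (x < p)) := by
  obtain ⟨hr1, hr2, hr3⟩ := pvFgGo ps x hs ps.length 0 ps.length (by omega) (by omega)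
    le_rfl (fun j hj hjlo => absurd hjlo (by omega)) (fun j hj hjlo => absurd hjlo (by omega))
  unfold firstGreater
  rw [pvFind?_first ps _ (firstGreaterGo ps x 0 ps.length) hr1
    (fun j hj hjr => by
      rw [decide_eq_false_iff_not]
      exact not_lt.mpr (hr2 j hj hjr))
    (fun hj => by
      rw [decide_eq_true_eq]
      exact hr3 _ hj le_rfl)]
  by_cases hlen : firstGreaterGo ps x 0 ps.length < ps.length
  · rw [if_pos hlen, List.getElem?_eq_getElem hlen, List.getD_eq_getElem _ _ hlen]
  · rw [if_neg hlen, List.getElem?_eq_none_iff.mpr (by omega)]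

lemma pvInnerEq (preA preB : List Int) (maxH K lo : Int)
    (heq : ∀ j : Int, 1 ≤ j → j ≤ maxH →
      PySem.List.pyGetD preA j 0 = PySem.List.pyGetD preB j 0)
    (hlo : 1 ≤ lo) (hloM : lo < maxH) :
    (PySem.List.pyRange (lo + 1) (maxH + 1) 1).findSome? (fun hi =>
        if PySem.List.pyGetD preA hi 0 - PySem.List.pyGetD preA lo 0 = K then
          some (pvStr lo hi)
        else none) =
      (match (pvDict preB maxH).get? (PySem.List.pyGetD preB lo 0 + K) with
       | some ps =>
         match firstGreater ps lo with
         | some hi => some (pvStr lo hi)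
         | none => none
       | none => none) := by
  rw [pvDict_get?]
  rw [pvFindSome?_ite (PySem.List.pyRange (lo + 1) (maxH + 1) 1)
    (fun hi => PySem.List.pyGetD preA hi 0 - PySem.List.pyGetD preA lo 0 = K)
    (fun hi => pvStr lo hi)]
  by_cases hfe : (PySem.List.pyRange 1 (maxH + 1) 1).filter
      (fun h => PySem.List.pyGetD preB h 0 == PySem.List.pyGetD preB lo 0 + K) = []
  · rw [if_pos hfe]
    rw [List.filter_eq_nil_iff] at hfe
    have hnone : (PySem.List.pyRange (lo + 1) (maxH + 1) 1).find?
        (fun hi => decide (PySem.List.pyGetD preA hi 0 - PySem.List.pyGetD preA lo 0 = K))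
        = none := by
      rw [List.find?_eq_none]
      intro hi hmem
      rw [PySem.List.mem_pyRange_one] at hmem
      rw [decide_eq_true_eq]
      intro hK
      apply hfe hi (by rw [PySem.List.mem_pyRange_one]; omega)
      rw [beq_iff_eq, heq hi (by omega) (by omega), heq lo (by omega) (by omega)] at *
      omega
    rw [hnone]
    rfl
  · rw [if_neg hfe]
    dsimp only
    have hfsort : ((PySem.List.pyRange 1 (maxH + 1) 1).filter
        (fun h => PySem.List.pyGetD preB h 0 == PySem.List.pyGetD preB lo 0 + K)).Pairwise
          (· < ·) :=
      List.Pairwise.sublist List.filter_sublist (PySem.List.pairwise_lt_pyRange_one 1 (maxH + 1))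
    have hmap : ∀ o : Option Int,
        (match o with
         | some hi => some (pvStr lo hi)
         | none => none) = o.map (fun hi => pvStr lo hi) := by
      intro o; cases o <;> rfl
    rw [pvFirstGreater_eq _ lo hfsort, hmap]
    congr 1
    rw [List.find?_filter]
    have hsplit : PySem.List.pyRange 1 (maxH + 1) 1 =
        PySem.List.pyRange 1 (lo + 1) 1 ++ PySem.List.pyRange (lo + 1) (maxH + 1) 1 :=
      PySem.List.pyRange_one_append 1 (lo + 1) (maxH + 1) (by omega) (by omega)
    rw [hsplit, List.find?_append]
    have hleft : (PySem.List.pyRange 1 (lo + 1) 1).find?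
        (fun a => decide ((PySem.List.pyGetD preB a 0 == PySem.List.pyGetD preB lo 0 + K) = true
          ∧ decide (lo < a) = true)) = none := by
      rw [List.find?_eq_none]
      intro a hmem
      rw [PySem.List.mem_pyRange_one] at hmem
      simp only [decide_eq_true_eq, not_and]
      intro _
      omega
    rw [hleft, Option.none_or]
    symm
    apply pvFind?_congr
    intro hi hmem
    rw [PySem.List.mem_pyRange_one] at hmem
    have e1 : PySem.List.pyGetD preA hi 0 = PySem.List.pyGetD preB hi 0 :=
      heq hi (by omega) (by omega)
    have e2 : PySem.List.pyGetD preA lo 0 = PySem.List.pyGetD preB lo 0 :=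
      heq lo (by omega) (by omega)
    rw [Bool.eq_iff_iff]
    simp only [decide_eq_true_eq, beq_iff_eq]
    rw [e1, e2]
    omega

lemma pvFinishEq (preA preB : List Int) (maxH K : Int)
    (heq : ∀ j : Int, 1 ≤ j → j ≤ maxH →
      PySem.List.pyGetD preA j 0 = PySem.List.pyGetD preB j 0) :
    pvFinishA preA maxH K = pvFinishB preB (pvDict preB maxH) maxH K := by
  unfold pvFinishA pvFinishB
  apply pvFindSome?_congr
  intro lo hlo
  rw [PySem.List.mem_pyRange_one] at hlo
  exact pvInnerEq preA preB maxH K lo heq hlo.1 hlo.2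

-- ===== VERDICT (by name: the statement is the Claim_ definition above) =====
theorem solve_spec : Claim_equal_solve := by
  unfold Claim_equal_solve
  intro N K H L _ _
  unfold Spec_solve
  rw [solveA_eq, solveB_eq]
  cases hm : PySem.List.max? H (fun y => y) with
  | none => rfl
  | some maxH =>
    show (match pvFinishA (pvBuildA N maxH H L) maxH K with
          | some s => s | none => "IMPOSSIBLE") =
        (match pvFinishB (pvBuildB (pvDiffArr N maxH H L) maxH).2.2
            (pvDict (pvBuildB (pvDiffArr N maxH H L) maxH).2.2 maxH) maxH K with
          | some s => s | none => "IMPOSSIBLE")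
    by_cases hmax : 1 ≤ maxH
    · have heq := pvPreEq N H L maxH hmax
      rw [pvFinishEq (pvBuildA N maxH H L) (pvBuildB (pvDiffArr N maxH H L) maxH).2.2 maxH K heq]
    · have hnil : PySem.List.pyRange 1 maxH 1 = [] :=
        PySem.List.pyRange_one_eq_nil (by omega)
      unfold pvFinishA pvFinishB
      rw [hnil]
      rfl
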